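-- pv_equiv track=rewrite | github.com/RohitKumarkolli/GitHub-RAG-Assistant | app/services/chunker.py | _char_pos_to_line
-- ===== SOURCE A (Python) =====
-- from typing import List, Optional
--
-- def _char_pos_to_line(char_pos: int, line_positions: List[int]) -> int:
--
--     if char_pos < 0 or not line_positions:
--         return 1
--     lo, hi = 0, len(line_positions) - 1
--     while lo <= hi:
--         mid = (lo + hi) // 2
--         if line_positions[mid] <= char_pos:
--             lo = mid + 1
--         else:
--             hi = mid - 1
--     return max(1, lo)
-- ===== SOURCE B (Python) =====
-- def _char_pos_to_line(char_pos, line_positions):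
--     if char_pos < 0 or not line_positions:
--         return 1
--     count = 0
--     for p in line_positions:
--         if p <= char_pos:
--             count += 1
--     return max(1, count)
-- ===== Notes on version B (the rewrite author's own statement) =====
-- stated objective: simpler
-- what changed: Replaces the hand-written lo/hi binary search with a single linear pass counting the entries <= char_pos, keeping the same guard and max(1, .) floor; Pre_ excludes inputs where an entry <= char_pos comes after an entry > char_pos, on which binary search's value is an accident of the probe sequence.
-- outside the precondition, e.g. on _char_pos_to_line(5, [10, 0, 0]): A returns 3, B returns 2
import Mathlib
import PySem

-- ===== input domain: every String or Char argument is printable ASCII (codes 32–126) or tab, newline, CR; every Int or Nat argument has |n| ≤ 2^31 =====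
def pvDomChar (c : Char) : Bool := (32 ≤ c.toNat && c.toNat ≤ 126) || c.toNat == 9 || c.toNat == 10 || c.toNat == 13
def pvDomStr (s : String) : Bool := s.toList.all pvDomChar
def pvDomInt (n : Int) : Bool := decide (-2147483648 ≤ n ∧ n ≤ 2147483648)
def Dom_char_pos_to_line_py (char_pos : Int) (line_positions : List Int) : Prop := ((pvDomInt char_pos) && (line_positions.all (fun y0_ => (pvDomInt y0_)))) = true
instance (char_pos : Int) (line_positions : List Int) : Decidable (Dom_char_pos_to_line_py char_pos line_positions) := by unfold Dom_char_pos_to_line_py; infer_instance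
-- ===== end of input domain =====

-- B replaces A's hand-written binary search by a single linear pass counting entries <= char_pos (simpler; not faster).


-- ===== PORT A =====
-- A's while loop over (lo, hi); the index mid is always in range (0 ≤ lo ≤ mid ≤ hi ≤ len-1),
-- so the `.getD 0` default is never used and Python never raises here.
def pvBsearch (char_pos : Int) (line_positions : List Int) (lo hi : Int) : Int :=
  if h : lo ≤ hi then
    let mid := PySem.Int.floordiv (lo + hi) 2
    if (PySem.List.pyGet? line_positions mid).getD 0 ≤ char_pos then
      pvBsearch char_pos line_positions (mid + 1) hi
    else
      pvBsearch char_pos line_positions lo (mid - 1)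
  else lo
termination_by (hi + 1 - lo).toNat
decreasing_by
  · have := PySem.Int.floordiv_two_mid_bounds h; omega
  · have := PySem.Int.floordiv_two_mid_bounds h; omega

def char_pos_to_line_py (char_pos : Int) (line_positions : List Int) : Int :=
  if char_pos < 0 ∨ line_positions = [] then 1
  else max 1 (pvBsearch char_pos line_positions 0 ((line_positions.length : Int) - 1))

-- ===== PORT B =====
def char_pos_to_line_py_alt (char_pos : Int) (line_positions : List Int) : Int :=
  if char_pos < 0 ∨ line_positions = [] then 1
  else max 1 (line_positions.foldl (fun c p => if p ≤ char_pos then c + 1 else c) 0)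

-- ===== PRECONDITION & SPEC =====
-- Pre_ excludes inputs where some entry ≤ char_pos comes after an entry > char_pos (the partition
-- binary search's sortedness contract guarantees for this query is broken there, so A's value is an
-- accident of the probe sequence); guarded inputs (char_pos < 0 or empty list) are trivially admitted.
def Pre_char_pos_to_line_py (char_pos : Int) (line_positions : List Int) : Prop :=
  char_pos < 0 ∨ line_positions = [] ∨
    line_positions.Pairwise (fun p q => q ≤ char_pos → p ≤ char_pos)
instance (char_pos : Int) (line_positions : List Int) : Decidable (Pre_char_pos_to_line_py char_pos line_positions) := by unfold Pre_char_pos_to_line_py; infer_instance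

def pvWitness_char_pos_to_line_py : Int × List Int := (5, [0, 3, 7])

def Spec_char_pos_to_line_py (char_pos : Int) (line_positions : List Int) (out : Int) : Prop := out = char_pos_to_line_py_alt char_pos line_positions
instance (char_pos : Int) (line_positions : List Int) (out : Int) : Decidable (Spec_char_pos_to_line_py char_pos line_positions out) := by unfold Spec_char_pos_to_line_py; infer_instance

-- ===== CLAIM (what is proved, stated in full; the proofs are below) =====
def Claim_equal_char_pos_to_line_py : Prop := ∀ (char_pos : Int) (line_positions : List Int), Dom_char_pos_to_line_py char_pos line_positions → Pre_char_pos_to_line_py char_pos line_positions → Spec_char_pos_to_line_py char_pos line_positions (char_pos_to_line_py char_pos line_positions)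

-- ===== LEMMAS AND PROOFS =====

-- number of indices i ∈ [lo, hi] with line_positions[i] ≤ x (out-of-range reads as 0, never used in range)
def pvCnt (x : Int) (a : List Int) (lo hi : Int) : Int :=
  if lo ≤ hi then
    (if (PySem.List.pyGet? a lo).getD 0 ≤ x then 1 else 0) + pvCnt x a (lo + 1) hi
  else 0
termination_by (hi + 1 - lo).toNat
decreasing_by omega

theorem pvCnt_split (x : Int) (a : List Int) (lo m hi : Int)
    (h1 : lo - 1 ≤ m) (h2 : m ≤ hi) :
    pvCnt x a lo hi = pvCnt x a lo m + pvCnt x a (m + 1) hi := by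
  by_cases h : lo ≤ m
  · conv_lhs => rw [pvCnt]
    conv_rhs => rw [pvCnt]
    rw [if_pos (by omega), if_pos h, pvCnt_split x a (lo + 1) m hi (by omega) h2]
    ring
  · have hz : pvCnt x a lo m = 0 := by rw [pvCnt, if_neg (by omega)]
    have hm : m + 1 = lo := by omega
    rw [hz, hm]; ring
termination_by (m + 1 - lo).toNat
decreasing_by omega

theorem pvCnt_all (x : Int) (a : List Int) (lo hi : Int)
    (h : ∀ i, lo ≤ i → i ≤ hi → (PySem.List.pyGet? a i).getD 0 ≤ x) :
    pvCnt x a lo hi = max 0 (hi + 1 - lo) := by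
  by_cases hl : lo ≤ hi
  · rw [pvCnt, if_pos hl, if_pos (h lo le_rfl hl),
      pvCnt_all x a (lo + 1) hi (fun i h1 h2 => h i (by omega) h2)]
    omega
  · rw [pvCnt, if_neg hl]; omega
termination_by (hi + 1 - lo).toNat
decreasing_by omega

theorem pvCnt_none (x : Int) (a : List Int) (lo hi : Int)
    (h : ∀ i, lo ≤ i → i ≤ hi → x < (PySem.List.pyGet? a i).getD 0) :
    pvCnt x a lo hi = 0 := by
  by_cases hl : lo ≤ hi
  · rw [pvCnt, if_pos hl, if_neg (by exact not_le.2 (h lo le_rfl hl)),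
      pvCnt_none x a (lo + 1) hi (fun i h1 h2 => h i (by omega) h2)]
    ring
  · rw [pvCnt, if_neg hl]
termination_by (hi + 1 - lo).toNat
decreasing_by omega

-- partition access: if the entry at j is ≤ x then so is every earlier entry
theorem pvPart_get (x : Int) (a : List Int)
    (hs : a.Pairwise (fun p q => q ≤ x → p ≤ x)) (i j : Int)
    (h0 : 0 ≤ i) (hij : i ≤ j) (hj : j < (a.length : Int))
    (hjx : (PySem.List.pyGet? a j).getD 0 ≤ x) :
    (PySem.List.pyGet? a i).getD 0 ≤ x := by
  have hi' : i.toNat < a.length := by omega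
  have hj' : j.toNat < a.length := by omega
  rw [PySem.List.pyGet?_of_nonneg a h0]
  rw [PySem.List.pyGet?_of_nonneg a (by omega : (0:Int) ≤ j)] at hjx
  simp only [List.getElem?_eq_getElem hi', List.getElem?_eq_getElem hj', Option.getD_some] at *
  rcases eq_or_lt_of_le hij with h | h
  · simpa [h] using hjx
  · exact List.Pairwise.rel_get_of_lt hs
      (by simpa using (by omega : i.toNat < j.toNat)) hjx

theorem pvBsearch_eq_cnt (x : Int) (a : List Int)
    (hs : a.Pairwise (fun p q => q ≤ x → p ≤ x)) (lo hi : Int)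
    (h0 : 0 ≤ lo) (hh : hi < (a.length : Int)) :
    pvBsearch x a lo hi = lo + pvCnt x a lo hi := by
  by_cases hl : lo ≤ hi
  · have hm := PySem.Int.floordiv_two_mid_bounds hl
    set mid := PySem.Int.floordiv (lo + hi) 2 with hmid
    rw [pvBsearch, dif_pos hl]
    by_cases hc : (PySem.List.pyGet? a mid).getD 0 ≤ x
    · rw [if_pos hc, pvBsearch_eq_cnt x a hs (mid + 1) hi (by omega) hh,
        pvCnt_split x a lo mid hi (by omega) (by omega),
        pvCnt_all x a lo mid
          (fun i h1 h2 => pvPart_get x a hs i mid (by omega) h2 (by omega) hc)]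
      omega
    · have hsplit := pvCnt_split x a lo (mid - 1) hi (by omega) (by omega)
      have hmm : mid - 1 + 1 = mid := by ring
      rw [hmm] at hsplit
      rw [if_neg hc, pvBsearch_eq_cnt x a hs lo (mid - 1) h0 (by omega), hsplit,
        pvCnt_none x a mid hi
          (fun i h1 h2 => not_le.mp
            (fun hle => hc (pvPart_get x a hs mid i (by omega) h1 (by omega) hle)))]
      ring
  · rw [pvBsearch, dif_neg hl, pvCnt, if_neg hl]; ring
termination_by (hi + 1 - lo).toNat
decreasing_by
  · omega
  · omega

-- index shift: pvCnt on (p :: t) from index lo+1 equals pvCnt on t from lo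
theorem pvCnt_shift (x p : Int) (t : List Int) (lo hi : Int) (h0 : 0 ≤ lo) :
    pvCnt x (p :: t) (lo + 1) (hi + 1) = pvCnt x t lo hi := by
  by_cases hl : lo ≤ hi
  · have hg : PySem.List.pyGet? (p :: t) (lo + 1) = PySem.List.pyGet? t lo := by
      obtain ⟨n, rfl⟩ : ∃ n : ℕ, lo = (n : ℤ) := ⟨lo.toNat, by omega⟩
      exact PySem.List.pyGet?_cons_succ p t n
    conv_rhs => rw [pvCnt]
    rw [pvCnt, if_pos (by omega), if_pos hl, hg,
      pvCnt_shift x p t (lo + 1) hi (by omega)]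
  · conv_rhs => rw [pvCnt]
    rw [pvCnt, if_neg (by omega), if_neg hl]
termination_by (hi + 1 - lo).toNat
decreasing_by omega

-- B's accumulator fold pulls out of the accumulator
theorem pvFold_acc (x : Int) (l : List Int) (c : Int) :
    l.foldl (fun c p => if p ≤ x then c + 1 else c) c
      = c + l.foldl (fun c p => if p ≤ x then c + 1 else c) 0 := by
  induction l generalizing c with
  | nil => simp
  | cons p t ih =>
    simp only [List.foldl_cons]
    rw [ih, ih (if p ≤ x then 0 + 1 else 0)]
    split_ifs <;> ring

theorem pvCnt_full (x : Int) (a : List Int) :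
    pvCnt x a 0 ((a.length : Int) - 1)
      = a.foldl (fun c p => if p ≤ x then c + 1 else c) 0 := by
  induction a with
  | nil => rw [pvCnt]; rfl
  | cons p t ih =>
    have hlen : (((p :: t).length : Int)) - 1 = ((t.length : Int) - 1) + 1 := by
      simp only [List.length_cons]; push_cast; ring
    rw [hlen, pvCnt, if_pos (by omega),
      pvCnt_shift x p t 0 ((t.length : Int) - 1) le_rfl, ih,
      PySem.List.pyGet?_zero_cons, Option.getD_some]
    simp only [List.foldl_cons]
    rw [pvFold_acc x t (if p ≤ x then 0 + 1 else 0)]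
    split_ifs <;> ring

-- ===== VERDICT (by name: the statement is the Claim_ definition above) =====
theorem char_pos_to_line_py_spec : Claim_equal_char_pos_to_line_py := by
  intro char_pos line_positions _ hpre
  unfold Spec_char_pos_to_line_py char_pos_to_line_py char_pos_to_line_py_alt
  by_cases h : char_pos < 0 ∨ line_positions = []
  · rw [if_pos h, if_pos h]
  · have hs : line_positions.Pairwise (fun p q => q ≤ char_pos → p ≤ char_pos) := by
      rcases hpre with h1 | h1 | h1
      · exact absurd (Or.inl h1) h
      · exact absurd (Or.inr h1) h
      · exact h1
    rw [if_neg h, if_neg h,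
      pvBsearch_eq_cnt char_pos line_positions hs 0 ((line_positions.length : Int) - 1)
        le_rfl (by omega),
      pvCnt_full]
    ring_nf
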